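-- pv_equiv track=rewrite | github.com/pypi-data/pypi-mirror-402 | packages/django-msaccess/django_msaccess-0.2.0.tar.gz/django_msaccess-0.2.0/src/django-msaccess/base.py | divide_value_parameters
-- ===== SOURCE A (Python) =====
-- def divide_value_parameters(dim, params):
--     """
--     Splits the tuple params into tuples of the specified dim size and returns them as a list.
--     If there are insufficient elements, fill with None.
--
--     Args:
--         dim (int): The size of the tuple to split.
--         params (params): Tuple to be split.
--
--     Returns:
--         list: A list of split tuples.
--     """
--     if dim <= 0:
--         # If dim is less than or equal to 0, return an empty list or consider error handling.
--         # This returns an empty list.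
--         return []
--
--     ary = []
--     n = len(params)
--
--     # Create a tuple for each dim size.
--     for i in range(0, n, dim):
--         # Get dim-sized chunks in a slice.
--         chunk = params[i:i + dim]
--
--         # If it is less than the dim size, fill it with None.
--         if len(chunk) < dim:
--             padding_needed = dim - len(chunk)
--             # Create a tuple of None and join
--             padded_chunk = chunk + (None,) * padding_needed
--         else:
--             padded_chunk = chunk
--
--         # Add to results list
--         ary.append(padded_chunk)
--
--     return ary
-- ===== SOURCE B (Python) =====
-- def divide_value_parameters(dim, params):
--     if dim <= 0:
--         return []
--     rows = -(-len(params) // dim)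
--     ary = [[None] * dim for _ in range(rows)]
--     for i, v in enumerate(params):
--         ary[i // dim][i % dim] = v
--     return [tuple(row) for row in ary]
-- ===== Notes on version B (the rewrite author's own statement) =====
-- stated objective: alternative
-- what changed: B never slices: it pre-allocates a ceil(n/dim)-row matrix of None and scatters each element into ary[i//dim][i%dim] by index arithmetic, instead of A's loop that slices dim-sized chunks and pads the short one.
import Mathlib
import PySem

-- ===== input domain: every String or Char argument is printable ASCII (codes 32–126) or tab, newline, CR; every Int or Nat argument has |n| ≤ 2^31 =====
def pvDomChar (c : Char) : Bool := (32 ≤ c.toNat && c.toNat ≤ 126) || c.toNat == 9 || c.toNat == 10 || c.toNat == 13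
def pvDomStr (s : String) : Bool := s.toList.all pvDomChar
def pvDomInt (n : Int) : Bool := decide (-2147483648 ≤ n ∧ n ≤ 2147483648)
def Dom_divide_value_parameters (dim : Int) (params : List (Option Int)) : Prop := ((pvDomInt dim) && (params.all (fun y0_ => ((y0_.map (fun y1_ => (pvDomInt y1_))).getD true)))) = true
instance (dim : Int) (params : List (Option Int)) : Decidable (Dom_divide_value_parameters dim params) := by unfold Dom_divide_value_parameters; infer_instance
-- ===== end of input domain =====

-- B replaces A's slice-and-pad-each-chunk loop by a scatter: pre-allocate a ceil(n/dim)-row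
-- all-None matrix and write each element into ary[i // dim][i % dim] (objective: alternative).

-- ===== PORT A =====
def divide_value_parameters (dim : Int) (params : List (Option Int)) : List (List (Option Int)) :=
  if dim ≤ 0 then
    []
  else
    let n : Int := (params.length : Int)
    (PySem.List.pyRange 0 n dim).foldl
      (fun ary i =>
        let chunk := PySem.List.slice params (some i) (some (i + dim))
        let padded_chunk :=
          if (chunk.length : Int) < dim then
            chunk ++ List.replicate (dim - (chunk.length : Int)).toNat (none : Option Int)
          else
            chunk
        ary ++ [padded_chunk])
      []

-- ===== PORT B =====
def divide_value_parameters_alt (dim : Int) (params : List (Option Int)) : List (List (Option Int)) :=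
  if dim ≤ 0 then
    []
  else
    let rows : Int := -(PySem.Int.floordiv (-(params.length : Int)) dim)
    let ary0 : List (List (Option Int)) :=
      (PySem.List.pyRange 0 rows 1).map (fun _ => List.replicate dim.toNat (none : Option Int))
    let ary :=
      (PySem.List.enumerate params 0).foldl
        (fun ary p =>
          ary.modify (PySem.Int.floordiv p.1 dim).toNat
            (fun row => row.set (PySem.Int.mod p.1 dim).toNat p.2))
        ary0
    ary.map (fun row => row)

-- ===== PRECONDITION & SPEC =====
def Spec_divide_value_parameters (dim : Int) (params : List (Option Int)) (out : List (List (Option Int))) : Prop := out = divide_value_parameters_alt dim params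
instance (dim : Int) (params : List (Option Int)) (out : List (List (Option Int))) : Decidable (Spec_divide_value_parameters dim params out) := by unfold Spec_divide_value_parameters; infer_instance

-- ===== CLAIM (what is proved, stated in full; the proofs are below) =====
def Claim_equal_divide_value_parameters : Prop := ∀ (dim : Int) (params : List (Option Int)), Dom_divide_value_parameters dim params → Spec_divide_value_parameters dim params (divide_value_parameters dim params)

-- ===== LEMMAS AND PROOFS =====

-- Canonical form both sides are reduced to: the k-th dim-sized window of a flat list.
def pvChunks (d cnt : Nat) (xs : List (Option Int)) : List (List (Option Int)) :=
  (List.range cnt).map (fun k => (xs.drop (d * k)).take d)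

-- B's fold writes elements one by one into the flat list underlying the matrix.
def pvWrite (xs : List (Option Int)) (s : Nat) (ys : List (Option Int)) : List (Option Int) :=
  match ys with
  | [] => xs
  | y :: t => pvWrite (xs.set s y) (s + 1) t

-- One in-place write into row m/d, column m%d, of the chunked view = one set in the flat list.
theorem pv_set_step (d cnt : Nat) (hd : 0 < d) (xs : List (Option Int))
    (_hlen : xs.length = cnt * d) (m : Nat) (_hm : m < cnt * d) (v : Option Int) :
    (pvChunks d cnt xs).modify (m / d) (fun row => row.set (m % d) v)
      = pvChunks d cnt (xs.set m v) := by
  have hdm := Nat.div_add_mod m d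
  have hmod : m % d < d := Nat.mod_lt _ hd
  apply List.ext_getElem
  · simp [List.length_modify, pvChunks]
  · intro k h1 h2
    have hk : k < cnt := by
      simpa [List.length_modify, pvChunks] using h1
    rw [List.getElem_modify]
    simp only [pvChunks, List.getElem_map, List.getElem_range]
    have hrow : d * k + d ≤ cnt * d := by
      have := Nat.mul_le_mul_left d hk
      calc d * k + d = d * (k + 1) := by ring
        _ ≤ d * cnt := Nat.mul_le_mul_left d hk
        _ = cnt * d := Nat.mul_comm d cnt
    apply List.ext_getElem
    · split_ifs <;> simp [List.length_set]
    · intro j hj1 hj2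
      have hjd : j < d := by
        simp only [List.length_take, List.length_drop, List.length_set] at hj2
        omega
      split_ifs with hq
      · rw [hq] at hdm
        simp only [List.getElem_set, List.getElem_take, List.getElem_drop]
        by_cases hj : m % d = j
        · simp [show m = d * k + j by omega, Nat.mod_eq_of_lt hjd]
        · simp [hj, show ¬ m = d * k + j by omega]
      · simp only [List.getElem_take, List.getElem_drop, List.getElem_set]
        have hne : ¬ m = d * k + j := by
          intro hc
          apply hq
          rw [hc, Nat.mul_add_div hd, Nat.div_eq_of_lt hjd]
          omega
        simp [hne]

-- The fold of B over 'enumerate params s' on a chunked matrix is pvWrite on the flat list.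
theorem pv_fold (d cnt : Nat) (hd : 0 < d) (ys : List (Option Int)) :
    ∀ (s : Nat) (xs : List (Option Int)), xs.length = cnt * d → s + ys.length ≤ cnt * d →
    (PySem.List.enumerate ys (s : Int)).foldl
      (fun ary p =>
        ary.modify (PySem.Int.floordiv p.1 (d : Int)).toNat
          (fun row => row.set (PySem.Int.mod p.1 (d : Int)).toNat p.2))
      (pvChunks d cnt xs)
    = pvChunks d cnt (pvWrite xs s ys) := by
  induction ys with
  | nil => intro s xs _ _; simp [PySem.List.enumerate_nil, pvWrite]
  | cons y t ih =>
    intro s xs hlen hbound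
    rw [PySem.List.enumerate_cons, List.foldl_cons]
    have hfd : (PySem.Int.floordiv ((s : Nat) : Int) ((d : Nat) : Int)).toNat = s / d := by
      rw [PySem.Int.floordiv_natCast]; exact Int.toNat_natCast _
    have hmd : (PySem.Int.mod ((s : Nat) : Int) ((d : Nat) : Int)).toNat = s % d := by
      rw [PySem.Int.mod_natCast]; exact Int.toNat_natCast _
    simp only [hfd, hmd]
    rw [pv_set_step d cnt hd xs hlen s (by simp at hbound; omega) y]
    have hcast : ((s : Nat) : Int) + 1 = (((s + 1 : Nat)) : Int) := by push_cast; ring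
    rw [hcast, ih (s + 1) (xs.set s y) (by simpa using hlen) (by simp at hbound ⊢; omega)]
    rfl

theorem pvWrite_length (ys : List (Option Int)) :
    ∀ (xs : List (Option Int)) (s : Nat), (pvWrite xs s ys).length = xs.length := by
  induction ys with
  | nil => intro xs s; rfl
  | cons y t ih => intro xs s; simp [pvWrite, ih]

theorem pvWrite_getElem (ys : List (Option Int)) :
    ∀ (xs : List (Option Int)) (s i : Nat) (hi : i < xs.length),
    (pvWrite xs s ys)[i]'(by rw [pvWrite_length]; exact hi)
      = if h : s ≤ i ∧ i < s + ys.length then ys[i - s]'(by omega) else xs[i] := by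
  induction ys with
  | nil =>
    intro xs s i hi
    simp only [pvWrite]
    rw [dif_neg (by rintro ⟨h1, h2⟩; simp at h2; omega)]
  | cons y t ih =>
    intro xs s i hi
    refine (ih (xs.set s y) (s + 1) i (by simpa using hi)).trans ?_
    by_cases hc1 : s + 1 ≤ i ∧ i < s + 1 + t.length
    · rw [dif_pos hc1, dif_pos (by simp; omega)]
      have hgt : i - s = (i - (s + 1)) + 1 := by omega
      simp only [hgt, List.getElem_cons_succ]
    · rw [dif_neg hc1]
      rw [List.getElem_set]
      by_cases hs : s = i
      · subst hs
        rw [if_pos rfl, dif_pos (by simp only [List.length_cons]; omega)]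
        simp
      · rw [if_neg hs, dif_neg (by simp only [List.length_cons]; omega)]

-- Writing all of params into an all-None flat list of length cnt*d yields the padded list.
theorem pvWrite_replicate (d cnt : Nat) (params : List (Option Int))
    (hle : params.length ≤ cnt * d) :
    pvWrite (List.replicate (cnt * d) (none : Option Int)) 0 params
      = params ++ List.replicate (cnt * d - params.length) (none : Option Int) := by
  have hlen : (pvWrite (List.replicate (cnt * d) (none : Option Int)) 0 params).length = cnt * d := by
    rw [pvWrite_length]; simp
  apply List.ext_getElem
  · rw [hlen]; simp; omega
  · intro i h1 h2
    rw [pvWrite_getElem params _ 0 i (by simpa using (hlen ▸ h1))]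
    rw [List.getElem_append]
    by_cases hin : i < params.length
    · rw [dif_pos ⟨by omega, by omega⟩, dif_pos hin]
      simp
    · rw [dif_neg (by omega), dif_neg hin]
      simp

-- A's loop produces exactly the chunked view of the padded list.
theorem pv_chunk_eq (xs : List (Option Int)) (d k T : Nat)
    (hk : d * k < xs.length) (hNT : xs.length ≤ T) (hTN : T < xs.length + d) (hdvd : d ∣ T) :
    (if ((xs.drop (d * k)).take d).length < d
       then (xs.drop (d * k)).take d ++
              List.replicate (d - ((xs.drop (d * k)).take d).length) (none : Option Int)
       else (xs.drop (d * k)).take d)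
    = ((xs ++ List.replicate (T - xs.length) none).drop (d * k)).take d := by
  have hlenL : (xs.drop (d * k)).length = xs.length - d * k := by simp
  by_cases hfull : d * k + d ≤ xs.length
  · have hlen : ((xs.drop (d * k)).take d).length = d := by
      simp only [List.length_take, hlenL]; omega
    rw [if_neg (by omega)]
    rw [List.drop_append_of_le_length (by omega)]
    rw [List.take_append_of_le_length (by omega)]
  · have hm' : T = d * k + d := by
      obtain ⟨m, rfl⟩ := hdvd
      have h1 : k < m := Nat.lt_of_mul_lt_mul_left (a := d) (lt_of_lt_of_le hk hNT)
      have h2 : m < k + 2 := by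
        have hlt : d * m < d * (k + 2) := by
          have h3 : d * (k + 2) = d * k + d + d := by ring
          omega
        exact Nat.lt_of_mul_lt_mul_left hlt
      have : m = k + 1 := by omega
      subst this; ring
    have htake : (xs.drop (d * k)).take d = xs.drop (d * k) :=
      List.take_of_length_le (by omega)
    rw [if_pos (by rw [htake, hlenL]; omega)]
    rw [htake]
    rw [List.drop_append_of_le_length (by omega)]
    rw [List.take_of_length_le (by simp only [List.length_append, List.length_replicate, hlenL]; omega)]
    rw [hlenL]
    congr 2
    omega

theorem pv_main (d : Nat) (hd0 : 0 < d) (params : List (Option Int)) :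
    divide_value_parameters (d : Int) params = divide_value_parameters_alt (d : Int) params := by
  have h0 : ¬ ((d : Int) ≤ 0) := by exact_mod_cast not_le.mpr (Int.natCast_pos.mpr hd0)
  have hd : (0 : Int) < (d : Int) := Int.natCast_pos.mpr hd0
  set N := params.length with hNdef
  set cnt := (N + d - 1) / d with hcnt
  have hmod := Nat.div_add_mod (N + d - 1) d
  rw [← hcnt] at hmod
  have hmodlt : (N + d - 1) % d < d := Nat.mod_lt _ hd0
  have hcomm : d * cnt = cnt * d := Nat.mul_comm _ _
  have hNle : N ≤ cnt * d := by omega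
  have hTlt : cnt * d < N + d := by omega
  have hA : divide_value_parameters (d : Int) params
      = pvChunks d cnt (params ++ List.replicate (cnt * d - N) none) := by
    simp only [divide_value_parameters, if_neg h0]
    rw [← hNdef]
    rw [PySem.List.foldl_append_singleton_eq_map, List.nil_append]
    rw [PySem.List.pyRange_of_pos _ _ hd]
    by_cases hN0 : N = 0
    · have hc0 : cnt = 0 := by
        rw [hcnt, hN0]; exact Nat.div_eq_of_lt (by omega)
      rw [if_neg (by rw [hN0]; simp)]
      simp [pvChunks, hc0]
    · have hNpos : 0 < N := Nat.pos_of_ne_zero hN0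
      have hcA : (((N : Int) - 0 + (d : Int) - 1) / (d : Int)).toNat = cnt := by
        rw [show ((N : Int) - 0 + (d : Int) - 1) = ((N + d - 1 : Nat) : Int) from by omega]
        rw [← Int.natCast_ediv, Int.toNat_natCast, hcnt]
      rw [if_pos (by exact_mod_cast hNpos), hcA, List.map_map]
      unfold pvChunks
      apply List.map_congr_left
      intro k hk
      rw [List.mem_range] at hk
      have hdk : d * k < N := by
        have h1 : d * (k + 1) ≤ d * cnt := Nat.mul_le_mul_left d hk
        have h2 : d * (k + 1) = d * k + d := by ring
        omega
      simp only [Function.comp_apply]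
      rw [show (0 + (d : Int) * (k : Nat)) = ((d * k : Nat) : Int) from by push_cast; ring]
      rw [PySem.List.slice_natCast_add params (d * k) d]
      simp only [Nat.cast_lt, Int.toNat_sub]
      rw [hNdef]
      exact pv_chunk_eq params d k (cnt * d) hdk hNle hTlt ⟨cnt, Nat.mul_comm cnt d⟩
  have hB : divide_value_parameters_alt (d : Int) params
      = pvChunks d cnt (params ++ List.replicate (cnt * d - N) none) := by
    simp only [divide_value_parameters_alt, if_neg h0]
    rw [← hNdef]
    have hrows : -(PySem.Int.floordiv (-(N : Int)) ((d : Nat) : Int)) = (cnt : Int) := by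
      rw [PySem.Int.neg_floordiv_neg_eq_iff_of_pos hd]
      have h1 : (cnt : Int) * (d : Int) < (N : Int) + (d : Int) := by exact_mod_cast hTlt
      have h2 : (N : Int) ≤ (cnt : Int) * (d : Int) := by exact_mod_cast hNle
      exact ⟨by nlinarith, h2⟩
    rw [hrows]
    have hary0 : (PySem.List.pyRange 0 ((cnt : Nat) : Int) 1).map
          (fun _ => List.replicate ((d : Nat) : Int).toNat (none : Option Int))
        = pvChunks d cnt (List.replicate (cnt * d) (none : Option Int)) := by
      rw [List.map_const', PySem.List.length_pyRange_one, Int.toNat_natCast,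
          show (((cnt : Nat) : Int) - 0) = ((cnt : Nat) : Int) from by ring, Int.toNat_natCast]
      apply List.ext_getElem
      · simp [pvChunks]
      · intro k h1 h2
        have hk : k < cnt := by simpa using h1
        have hrow : d * k + d ≤ cnt * d := by
          calc d * k + d = d * (k + 1) := by ring
            _ ≤ d * cnt := Nat.mul_le_mul_left d hk
            _ = cnt * d := Nat.mul_comm d cnt
        simp only [pvChunks, List.getElem_replicate, List.getElem_map, List.getElem_range,
          List.drop_replicate, List.take_replicate]
        congr 1
        omega
    rw [hary0]
    rw [show (0 : Int) = ((0 : Nat) : Int) from by simp]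
    rw [pv_fold d cnt hd0 params 0 (List.replicate (cnt * d) none) (by simp)
        (by simpa using hNle)]
    rw [pvWrite_replicate d cnt params hNle]
    rw [List.map_id']
  rw [hA, hB]

theorem divide_value_parameters_spec : Claim_equal_divide_value_parameters := by
  intro dim params _
  unfold Spec_divide_value_parameters
  by_cases h0 : dim ≤ 0
  · unfold divide_value_parameters divide_value_parameters_alt
    rw [if_pos h0, if_pos h0]
  · obtain ⟨d, rfl⟩ : ∃ d : Nat, dim = (d : Int) := ⟨dim.toNat, by omega⟩
    exact pv_main d (by exact_mod_cast not_le.mp h0) params
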